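-- pv_equiv track=rewrite | github.com/tara-shukla/lru_caching | mergesort_4.py | merge_4
-- ===== SOURCE A (Python) =====
-- def merge_4(A, B, C, D):
--     """Merge 4 arrays passed in sorted order."""
--     # TODO: Your code here.
--     result = []
--
--     i = j = k = l = 0
--
--     while i < len(A) or j < len(B) or k < len(C) or l < len(D):
--
--         candidates = []
--
--         if i < len(A): candidates.append((A[i], 0))
--         if j < len(B): candidates.append((B[j], 1))
--
--         if k < len(C): candidates.append((C[k], 2))
--         if l < len(D): candidates.append((D[l], 3))
--
--         min_val, min_src = candidates[0]
--
--         for val, src in candidates[1:]: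
--             if val < min_val:
--
--                 min_val, min_src = val, src
--
--         result.append(min_val)
--
--         if   min_src == 0: i += 1
--
--         elif min_src == 1: j += 1
--
--         elif min_src == 2: k += 1
--
--         else:              l += 1
--
--     return result
-- ===== SOURCE B (Python) =====
-- def merge_4(A, B, C, D):
--     """Merge 4 arrays passed in sorted order (pairwise two-way merges)."""
--     def merge2(xs, ys):
--         out = []
--         i = j = 0
--         while i < len(xs) and j < len(ys):
--             if ys[j] < xs[i]:
--                 out.append(ys[j])
--                 j += 1
--             else:
--                 out.append(xs[i])
--                 i += 1
--         out.extend(xs[i:])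
--         out.extend(ys[j:])
--         return out
--     return merge2(merge2(A, B), merge2(C, D))
-- ===== Notes on version B (the rewrite author's own statement) =====
-- stated objective: simpler
-- what changed: Replaced the per-step 4-candidate min scan over index state with two-level pairwise stable two-way merges: merge2(merge2(A,B), merge2(C,D)).
import Mathlib
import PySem

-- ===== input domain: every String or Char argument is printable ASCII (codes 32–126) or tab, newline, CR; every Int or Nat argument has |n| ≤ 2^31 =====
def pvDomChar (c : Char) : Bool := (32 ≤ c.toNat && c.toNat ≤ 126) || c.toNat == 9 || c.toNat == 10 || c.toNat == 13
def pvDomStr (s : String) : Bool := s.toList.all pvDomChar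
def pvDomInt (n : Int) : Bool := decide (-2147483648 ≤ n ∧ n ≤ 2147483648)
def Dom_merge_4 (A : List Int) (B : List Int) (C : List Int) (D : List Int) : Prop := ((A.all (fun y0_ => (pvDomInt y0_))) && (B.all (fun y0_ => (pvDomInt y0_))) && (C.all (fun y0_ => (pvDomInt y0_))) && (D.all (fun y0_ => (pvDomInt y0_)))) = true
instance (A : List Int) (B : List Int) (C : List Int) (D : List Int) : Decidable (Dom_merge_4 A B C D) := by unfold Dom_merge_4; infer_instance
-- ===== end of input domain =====

-- B replaces A's per-step scan over four candidate heads with two-level pairwise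
-- stable two-way merges (simpler decomposition; same output, including ties A<B<C<D).

-- ===== PORT A =====
-- candidates list for the current heads: (value, source index), sources 0..3 in order
def pvCands (A B C D : List Int) : List (Int × Int) :=
  (match A with | a :: _ => [(a, (0 : Int))] | [] => []) ++
  (match B with | b :: _ => [(b, (1 : Int))] | [] => []) ++
  (match C with | c :: _ => [(c, (2 : Int))] | [] => []) ++
  (match D with | d :: _ => [(d, (3 : Int))] | [] => [])

-- the 'for val, src in candidates[1:]' strict-< min scan (first minimum wins)
def pvMinScan : Int × Int → List (Int × Int) → Int × Int
  | acc, [] => acc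
  | (mv, ms), (v, s) :: rest =>
      if v < mv then pvMinScan (v, s) rest else pvMinScan (mv, ms) rest

-- the if/elif chain advancing the chosen source's index (here: dropping its head)
def pvAdvance (A B C D : List Int) (src : Int) : List Int × List Int × List Int × List Int :=
  if src = 0 then (A.tail, B, C, D)
  else if src = 1 then (A, B.tail, C, D)
  else if src = 2 then (A, B, C.tail, D)
  else (A, B, C, D.tail)

-- the while loop; fuel = total remaining length, only to make the same computation total
def merge_4_loop : Nat → List Int → List Int → List Int → List Int → List Int
  | 0, _, _, _, _ => []
  | fuel + 1, A, B, C, D =>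
      match pvCands A B C D with
      | [] => []
      | c :: rest =>
          match pvMinScan c rest with
          | (mv, ms) =>
            match pvAdvance A B C D ms with
            | (A', B', C', D') => mv :: merge_4_loop fuel A' B' C' D'

def merge_4 (A : List Int) (B : List Int) (C : List Int) (D : List Int) : List Int :=
  merge_4_loop (A.length + B.length + C.length + D.length) A B C D

-- ===== PORT B =====
-- Source B's merge2: take ys's head when ys[j] < xs[i], else xs's head (left wins ties)
def merge2 : List Int → List Int → List Int
  | [], ys => ys
  | x :: xs, [] => x :: xs
  | x :: xs, y :: ys =>
      if y < x then y :: merge2 (x :: xs) ys else x :: merge2 xs (y :: ys)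

def merge_4_alt (A : List Int) (B : List Int) (C : List Int) (D : List Int) : List Int :=
  merge2 (merge2 A B) (merge2 C D)

-- ===== PRECONDITION & SPEC =====
def Spec_merge_4 (A : List Int) (B : List Int) (C : List Int) (D : List Int) (out : List Int) : Prop := out = merge_4_alt A B C D
instance (A : List Int) (B : List Int) (C : List Int) (D : List Int) (out : List Int) : Decidable (Spec_merge_4 A B C D out) := by unfold Spec_merge_4; infer_instance

-- ===== CLAIM (what is proved, stated in full; the proofs are below) =====
def Claim_equal_merge_4 : Prop := ∀ (A : List Int) (B : List Int) (C : List Int) (D : List Int), Dom_merge_4 A B C D → Spec_merge_4 A B C D (merge_4 A B C D)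

-- ===== LEMMAS AND PROOFS =====
@[simp] theorem merge2_nil_right (xs : List Int) : merge2 xs [] = xs := by
  cases xs <;> simp [merge2]

theorem merge_4_loop_eq (fuel : Nat) : ∀ A B C D : List Int,
    A.length + B.length + C.length + D.length ≤ fuel →
    merge_4_loop fuel A B C D = merge2 (merge2 A B) (merge2 C D) := by
  induction fuel with
  | zero =>
      intro A B C D h
      have hA : A = [] := by cases A <;> simp_all
      have hB : B = [] := by cases B <;> simp_all
      have hC : C = [] := by cases C <;> simp_all
      have hD : D = [] := by cases D <;> simp_all
      subst hA; subst hB; subst hC; subst hD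
      simp [merge_4_loop]
  | succ n ih =>
      intro A B C D h
      cases A <;> cases B <;> cases C <;> cases D <;>
        simp only [List.length_cons, List.length_nil] at h <;>
        simp only [merge_4_loop, pvCands, pvMinScan, pvAdvance, merge2,
          List.cons_append, List.nil_append, List.tail_cons, List.tail_nil] <;>
        (repeat' first
          | rfl
          | omega
          | split_ifs
          | simp only [merge2]
          | (refine congrArg _ ?_
             rw [ih _ _ _ _ (by simp; omega)]
             simp [merge2]))

-- ===== VERDICT (by name: the statement is the Claim_ definition above) =====
theorem merge_4_spec : Claim_equal_merge_4 := by
  intro A B C D _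
  unfold Spec_merge_4 merge_4 merge_4_alt
  exact merge_4_loop_eq _ A B C D le_rfl
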